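-- pv_equiv track=rewrite | github.com/Jskenpo/PROYECTO2_ALGORITMOS | proyecto.py | longest_non_prefix_set_divide_conquer
-- ===== SOURCE A (Python) =====
-- def longest_non_prefix_set_divide_conquer(strings):
--     if not strings:
--         return 0
--
--     if len(strings) == 1:
--         return 1
--
--     mid = len(strings) // 2
--     left_set = strings[:mid]
--     right_set = strings[mid:]
--
--     # Recursively find the largest non-prefix set for left and right subsets
--     left_size = longest_non_prefix_set_divide_conquer(left_set)
--     right_size = longest_non_prefix_set_divide_conquer(right_set)
--
--     # Merge and find the largest non-prefix set for the merged set
--     merged_set = set(left_set) | set(right_set)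
--     merged_size = 0
--     for s in merged_set:
--         if all(not s.startswith(t) for t in merged_set if t != s):
--             merged_size += 1
--
--     # Return the maximum size among left, right, and merged sets
--     return max(left_size, right_size, merged_size)
-- ===== SOURCE B (Python) =====
-- def longest_non_prefix_set_divide_conquer(strings):
--     if not strings:
--         return 0
--     if len(strings) == 1:
--         return 1
--     mid = len(strings) // 2
--     best = max(longest_non_prefix_set_divide_conquer(strings[:mid]),
--                longest_non_prefix_set_divide_conquer(strings[mid:]))
--     # count strings none of whose proper prefixes occurs in the set:
--     # O(k*L^2) hash lookups instead of A's O(k^2) pairwise startswith scan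
--     distinct = set(strings)
--     count = sum(1 for s in distinct
--                 if not any(s[:i] in distinct for i in range(len(s))))
--     return max(best, count)
-- ===== Notes on version B (the rewrite author's own statement) =====
-- stated objective: faster
-- what changed: Per recursion node, B replaces A's all-pairs startswith scan over the deduplicated set (O(k^2*L)) by deduplicating once into a hash set and testing each string's proper prefixes for membership (O(k*L^2) expected), keeping the same divide-and-conquer recursion.
import Mathlib
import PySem

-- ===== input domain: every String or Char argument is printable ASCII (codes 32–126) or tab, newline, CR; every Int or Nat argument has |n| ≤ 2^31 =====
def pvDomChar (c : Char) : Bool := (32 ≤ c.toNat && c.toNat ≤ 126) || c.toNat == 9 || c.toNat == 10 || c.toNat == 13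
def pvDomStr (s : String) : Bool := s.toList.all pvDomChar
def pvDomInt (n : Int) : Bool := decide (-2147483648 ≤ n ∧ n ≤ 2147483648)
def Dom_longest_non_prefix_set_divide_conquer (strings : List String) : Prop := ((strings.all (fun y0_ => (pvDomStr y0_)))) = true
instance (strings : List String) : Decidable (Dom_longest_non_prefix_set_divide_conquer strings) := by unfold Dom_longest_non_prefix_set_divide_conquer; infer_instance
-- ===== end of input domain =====

-- B replaces A's quadratic pairwise startswith scan per node by a hash-set prefix-enumeration
-- count over the deduplicated node (objective: faster per-node counting); same recursion tree, same return value.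

-- ===== PORT A =====
-- literal transliteration of A; the 'for s in merged_set' loop only counts, so the
-- result does not depend on Python's set iteration order.
-- fuel = strings.length bounds the recursion depth (each recursive call strictly shrinks
-- the list, so the fuel is never exhausted); it only makes the same computation total.
def longestGoA (fuel : Nat) (strings : List String) : Int :=
  match fuel with
  | 0 => 0
  | fuel + 1 =>
    if strings = [] then 0
    else if strings.length = 1 then 1
    else
      -- mid = len(strings) // 2 : both operands nonnegative, Nat division is exact here
      let mid : Nat := strings.length / 2
      let left_set := PySem.List.slice strings none (some (mid : Int))
      let right_set := PySem.List.slice strings (some (mid : Int)) none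
      let left_size := longestGoA fuel left_set
      let right_size := longestGoA fuel right_set
      let merged_set := PySem.Set.union (PySem.Set.ofList left_set) (PySem.Set.ofList right_set)
      let merged_size : Int := merged_set.foldl (fun acc s =>
        if merged_set.all (fun t => t == s || !(PySem.Str.startswith s t)) then acc + 1 else acc) 0
      max (max left_size right_size) merged_size

def longest_non_prefix_set_divide_conquer (strings : List String) : Int :=
  longestGoA strings.length strings

-- ===== PORT B =====
def longestGoB (fuel : Nat) (strings : List String) : Int :=
  match fuel with
  | 0 => 0
  | fuel + 1 =>
    if strings = [] then 0
    else if strings.length = 1 then 1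
    else
      let mid : Nat := strings.length / 2
      let best := max
        (longestGoB fuel (PySem.List.slice strings none (some (mid : Int))))
        (longestGoB fuel (PySem.List.slice strings (some (mid : Int)) none))
      let distinct := PySem.Set.ofList strings
      -- sum(1 for s in distinct if not any(s[:i] in distinct for i in range(len(s))))
      let count : Int := ((distinct.filter (fun s =>
          !((PySem.List.pyRange 0 (PySem.Str.len s) 1).any (fun i =>
            PySem.Set.contains distinct (PySem.Str.slice s none (some i)))))).length : Int)
      max best count

def longest_non_prefix_set_divide_conquer_alt (strings : List String) : Int :=
  longestGoB strings.length strings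

-- ===== PRECONDITION & SPEC =====
def Spec_longest_non_prefix_set_divide_conquer (strings : List String) (out : Int) : Prop := out = longest_non_prefix_set_divide_conquer_alt strings
instance (strings : List String) (out : Int) : Decidable (Spec_longest_non_prefix_set_divide_conquer strings out) := by unfold Spec_longest_non_prefix_set_divide_conquer; infer_instance

-- ===== CLAIM (what is proved, stated in full; the proofs are below) =====
def Claim_equal_longest_non_prefix_set_divide_conquer : Prop := ∀ (strings : List String), Dom_longest_non_prefix_set_divide_conquer strings → Spec_longest_non_prefix_set_divide_conquer strings (longest_non_prefix_set_divide_conquer strings)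

-- ===== LEMMAS AND PROOFS =====

-- "some other element of L is a prefix of s" = "some proper prefix of s lies in L"
lemma cond_eq (L : List String) (s : String) :
    (L.all (fun t => t == s || !(PySem.Str.startswith s t))) =
    !((PySem.List.pyRange 0 (PySem.Str.len s) 1).any (fun i =>
      PySem.Set.contains L (PySem.Str.slice s none (some i)))) := by
  rw [Bool.eq_iff_iff]
  simp only [Bool.not_eq_true', List.all_eq_true, List.any_eq_false]
  have hsl : ∀ i : Int, 0 ≤ i →
      (PySem.Str.slice s none (some i)).toList = s.toList.take i.toNat := by
    intro i hi
    rw [PySem.Str.toList_slice, PySem.Chars.slice_eq_listSlice, PySem.List.slice_to s.toList hi]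
  constructor
  · intro h i hi
    rw [PySem.List.mem_pyRange_one, PySem.Str.len_eq] at hi
    obtain ⟨hi0, hilen⟩ := hi
    intro hc
    have hmem : PySem.Str.slice s none (some i) ∈ L := (PySem.Set.contains_iff L _).mp hc
    have ht := h _ hmem
    have htl : (PySem.Str.slice s none (some i)).toList = s.toList.take i.toNat := hsl i hi0
    have hlen : (PySem.Str.slice s none (some i)).toList.length = i.toNat := by
      rw [htl, List.length_take]; omega
    have hne : (PySem.Str.slice s none (some i)) ≠ s := by
      intro he
      rw [he] at hlen
      omega
    have hpre : PySem.Str.startswith s (PySem.Str.slice s none (some i)) = true := by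
      rw [PySem.Str.startswith_eq, PySem.Chars.startswith_iff, htl]
      exact List.take_prefix _ _
    simp only [Bool.or_eq_true, beq_iff_eq, Bool.not_eq_true'] at ht
    rcases ht with h1 | h2
    · exact hne h1
    · rw [hpre] at h2
      exact Bool.noConfusion h2
  · intro h t htL
    by_cases hts : t = s
    · simp [hts]
    · simp only [Bool.or_eq_true, beq_iff_eq, Bool.not_eq_true']
      refine Or.inr ?_
      by_contra hsw'
      have hsw : t.toList <+: s.toList := by
        rw [← PySem.Chars.startswith_iff, ← PySem.Str.startswith_eq]
        cases hx : PySem.Str.startswith s t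
        · exact absurd hx hsw'
        · rfl
      have hlt : t.toList.length < s.toList.length := by
        rcases Nat.lt_or_ge t.toList.length s.toList.length with h' | h'
        · exact h'
        · exact absurd (String.toList_inj.mp
            (hsw.eq_of_length (Nat.le_antisymm hsw.length_le h'))) hts
      have hmemR : (t.toList.length : Int) ∈ PySem.List.pyRange 0 (PySem.Str.len s) 1 := by
        rw [PySem.List.mem_pyRange_one, PySem.Str.len_eq]
        exact ⟨Int.natCast_nonneg _, by exact_mod_cast hlt⟩
      have hcf := h _ hmemR
      have heq : PySem.Str.slice s none (some (t.toList.length : Int)) = t := by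
        rw [← String.toList_inj, hsl _ (Int.natCast_nonneg _), Int.toNat_natCast]
        exact (List.prefix_iff_eq_take.mp hsw).symm
      rw [heq] at hcf
      exact hcf ((PySem.Set.contains_iff L t).mpr htL)

-- the merged set of A's node is a permutation of set(strings)
lemma merged_perm (strings : List String) (mid : Nat) :
    List.Perm
      (PySem.Set.union (PySem.Set.ofList (PySem.List.slice strings none (some (mid : Int))))
        (PySem.Set.ofList (PySem.List.slice strings (some (mid : Int)) none)))
      (PySem.Set.ofList strings) := by
  rw [List.perm_ext_iff_of_nodup
    (PySem.Set.nodup_union _ _ (PySem.Set.nodup_ofList _)) (PySem.Set.nodup_ofList _)]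
  intro y
  rw [PySem.Set.mem_union, PySem.Set.mem_ofList, PySem.Set.mem_ofList, PySem.Set.mem_ofList,
    PySem.List.slice_to_natCast, PySem.List.slice_from_natCast,
    ← List.mem_append, List.take_append_drop]

lemma all_congr_perm {l l' : List String} (p : String → Bool) (h : List.Perm l l') :
    l.all p = l'.all p := by
  rw [Bool.eq_iff_iff]
  simp only [List.all_eq_true]
  exact ⟨fun H x hx => H x (h.mem_iff.mpr hx), fun H x hx => H x (h.mem_iff.mp hx)⟩

-- A's merged count = B's count, at every node
lemma ms_eq (strings : List String) (mid : Nat) :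
    (PySem.Set.union (PySem.Set.ofList (PySem.List.slice strings none (some (mid : Int))))
        (PySem.Set.ofList (PySem.List.slice strings (some (mid : Int)) none))).foldl
      (fun acc s =>
        if (PySem.Set.union (PySem.Set.ofList (PySem.List.slice strings none (some (mid : Int))))
            (PySem.Set.ofList (PySem.List.slice strings (some (mid : Int)) none))).all
            (fun t => t == s || !(PySem.Str.startswith s t)) then acc + 1 else acc) (0 : Int)
    = (((PySem.Set.ofList strings).filter (fun s =>
        !((PySem.List.pyRange 0 (PySem.Str.len s) 1).any (fun i =>
          PySem.Set.contains (PySem.Set.ofList strings) (PySem.Str.slice s none (some i)))))).length : Int) := by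
  rw [PySem.List.foldl_if_add_one, zero_add]
  have hperm := merged_perm strings mid
  have hfun : (fun s => (PySem.Set.union (PySem.Set.ofList (PySem.List.slice strings none (some (mid : Int))))
          (PySem.Set.ofList (PySem.List.slice strings (some (mid : Int)) none))).all
          (fun t => t == s || !(PySem.Str.startswith s t)))
      = (fun s => !((PySem.List.pyRange 0 (PySem.Str.len s) 1).any (fun i =>
          PySem.Set.contains (PySem.Set.ofList strings) (PySem.Str.slice s none (some i))))) := by
    funext s
    rw [all_congr_perm _ hperm, cond_eq]
  rw [hfun, hperm.countP_eq, List.countP_eq_length_filter]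

lemma go_eq (fuel : Nat) : ∀ strings : List String, longestGoA fuel strings = longestGoB fuel strings := by
  induction fuel with
  | zero => intro strings; rfl
  | succ fuel ih =>
    intro strings
    rw [longestGoA, longestGoB]
    split_ifs with h1 h2
    · rfl
    · rfl
    · simp only []
      rw [ih, ih, ms_eq]

lemma main_eq (strings : List String) :
    longest_non_prefix_set_divide_conquer strings = longest_non_prefix_set_divide_conquer_alt strings := by
  rw [longest_non_prefix_set_divide_conquer, longest_non_prefix_set_divide_conquer_alt, go_eq]

-- ===== VERDICT (by name: the statement is the Claim_ definition above) =====
theorem longest_non_prefix_set_divide_conquer_spec : Claim_equal_longest_non_prefix_set_divide_conquer := by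
  intro strings _
  exact main_eq strings
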